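-- pv_equiv track=rewrite | github.com/GordoManatee/Calculadora-de-derivadas | Calculadora_derivadas.py | separar_terminos
-- ===== SOURCE A (Python) =====
-- def separar_terminos(funcion):
--     """
--     Separa los términos de una función polinómica en una lista.
--     Entrada: funcion (cadena de texto que representa la función polinómica).
--     Salida: lista de términos separados.
--     """
--     funcion = funcion.replace(" ", "")
--     terminos = []
--     i = 0
--     while i < len(funcion):
--         if funcion[i] == "+" or funcion[i] == "-":
--             terminos.append(funcion[i])
--             i += 1
--         else:
--             j = i
--             while j < len(funcion) and funcion[j] not in "+-":
--                 j += 1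
--             terminos.append(funcion[i:j])
--             i = j
--     return terminos
-- ===== SOURCE B (Python) =====
-- def separar_terminos(funcion):
--     """Single accumulator pass instead of nested index loops with slicing."""
--     terminos = []
--     cur = ""
--     for ch in funcion.replace(" ", ""):
--         if ch == "+" or ch == "-":
--             if cur:
--                 terminos.append(cur)
--                 cur = ""
--             terminos.append(ch)
--         else:
--             cur += ch
--     if cur:
--         terminos.append(cur)
--     return terminos
-- ===== Notes on version B (the rewrite author's own statement) =====
-- stated objective: simpler
-- what changed: Replaces A's nested while-loops with index arithmetic and slicing by a single for-loop over the characters maintaining one string buffer that is flushed at each sign.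
import Mathlib
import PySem

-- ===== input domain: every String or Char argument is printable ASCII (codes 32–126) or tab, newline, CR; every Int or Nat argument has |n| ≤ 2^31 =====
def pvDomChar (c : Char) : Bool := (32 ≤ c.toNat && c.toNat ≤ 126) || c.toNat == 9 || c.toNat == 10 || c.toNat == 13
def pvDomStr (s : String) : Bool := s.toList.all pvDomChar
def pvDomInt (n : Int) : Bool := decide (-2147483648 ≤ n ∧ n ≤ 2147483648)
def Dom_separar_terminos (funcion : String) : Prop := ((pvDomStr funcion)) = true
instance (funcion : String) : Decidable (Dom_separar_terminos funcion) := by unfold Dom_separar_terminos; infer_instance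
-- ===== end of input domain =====

-- B replaces A's nested while-loops with slicing by a single accumulator pass; objective: simpler.

-- ===== PORT A =====
-- inner while loop of A: scan forward while the char is not in "+-",
-- returning (the scanned span funcion[i:j], the rest from j on)
def pvInnerA : List Char → List Char × List Char
  | [] => ([], [])
  | c :: rest =>
    if c = '+' || c = '-' then ([], c :: rest)
    else
      let (t, r) := pvInnerA rest
      (c :: t, r)

theorem pvInnerA_len (cs : List Char) : (pvInnerA cs).2.length ≤ cs.length := by
  induction cs with
  | nil => simp [pvInnerA]
  | cons c rest ih =>
    simp only [pvInnerA]
    split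
    · simp
    · simpa using Nat.le_succ_of_le ih

-- outer while loop of A over the remaining characters
def pvLoopA : List Char → List String
  | [] => []
  | c :: rest =>
    if c = '+' || c = '-' then String.ofList [c] :: pvLoopA rest
    else
      let p := pvInnerA (c :: rest)
      String.ofList p.1 :: pvLoopA p.2
termination_by cs => cs.length
decreasing_by
  · simp
  · have := pvInnerA_len rest
    simp only [pvInnerA]
    split
    · simp_all
    · simp
      omega

def separar_terminos (funcion : String) : List String :=
  pvLoopA (PySem.Str.replace funcion " " "").toList

-- ===== PORT B =====
-- B's for-loop with the buffer `cur`; at the end the buffer is flushed if non-empty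
def pvLoopB : List Char → List Char → List String
  | [], cur => if cur = [] then [] else [String.ofList cur]
  | c :: rest, cur =>
    if c = '+' || c = '-' then
      if cur = [] then String.ofList [c] :: pvLoopB rest []
      else String.ofList cur :: String.ofList [c] :: pvLoopB rest []
    else pvLoopB rest (cur ++ [c])

def separar_terminos_alt (funcion : String) : List String :=
  pvLoopB (PySem.Str.replace funcion " " "").toList []

-- ===== PRECONDITION & SPEC =====
def Spec_separar_terminos (funcion : String) (out : List String) : Prop := out = separar_terminos_alt funcion
instance (funcion : String) (out : List String) : Decidable (Spec_separar_terminos funcion out) := by unfold Spec_separar_terminos; infer_instance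

-- ===== CLAIM (what is proved, stated in full; the proofs are below) =====
def Claim_equal_separar_terminos : Prop := ∀ (funcion : String), Dom_separar_terminos funcion → Spec_separar_terminos funcion (separar_terminos funcion)

-- ===== LEMMAS AND PROOFS =====

-- joint loop invariant: with an empty buffer B's loop equals A's loop; with a
-- non-empty buffer B's loop emits buffer ++ A's inner span, then continues as A
theorem pvLoop_eq (cs : List Char) :
    pvLoopB cs [] = pvLoopA cs ∧
    ∀ cur, cur ≠ [] →
      pvLoopB cs cur = String.ofList (cur ++ (pvInnerA cs).1) :: pvLoopA (pvInnerA cs).2 := by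
  induction cs with
  | nil =>
    refine ⟨by simp [pvLoopB, pvLoopA], ?_⟩
    intro cur h
    simp [pvLoopB, pvInnerA, pvLoopA, h]
  | cons c rest ih =>
    by_cases hc : (c = '+' || c = '-') = true
    · constructor
      · simp [pvLoopB, pvLoopA, hc, ih.1]
      · intro cur h
        simp [pvLoopB, pvLoopA, pvInnerA, hc, h, ih.1]
    · constructor
      · have h2 := ih.2 [c] (by simp)
        simp only [pvLoopB, pvLoopA, hc, pvInnerA] at *
        simp [h2]
      · intro cur h
        have h2 := ih.2 (cur ++ [c]) (by simp)
        simp only [pvLoopB, hc, pvInnerA, h] at *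
        simp [h2]

-- ===== VERDICT (by name: the statement is the Claim_ definition above) =====
theorem separar_terminos_spec : Claim_equal_separar_terminos := by
  intro funcion _
  unfold Spec_separar_terminos separar_terminos separar_terminos_alt
  exact (pvLoop_eq _).1.symm
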